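-- pv_equiv track=rewrite | github.com/ANRGUSC/TinyLoRA | tinylora/adapter.py | choose_tie_factor_for_budget
-- ===== SOURCE A (Python) =====
-- import math
--
-- def estimate_trainable_params(num_modules: int, projection_dim: int, tie_factor: int) -> int:
--     groups = math.ceil(num_modules / max(1, tie_factor))
--     return groups * max(1, projection_dim)
--
-- def choose_tie_factor_for_budget(num_modules: int, projection_dim: int, target_params: int) -> tuple[int, int]:
--     if num_modules <= 0:
--         return 1, 0
--     best_tie = 1
--     best_params = estimate_trainable_params(num_modules, projection_dim, best_tie)
--     best_score = abs(best_params - target_params)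
--     for tie in range(1, num_modules + 1):
--         actual = estimate_trainable_params(num_modules, projection_dim, tie)
--         score = abs(actual - target_params)
--         # Prefer fewer params when equally close, for cost control.
--         if score < best_score or (score == best_score and actual < best_params):
--             best_score = score
--             best_params = actual
--             best_tie = tie
--     return best_tie, best_params
-- ===== SOURCE B (Python) =====
-- def choose_tie_factor_for_budget(num_modules, projection_dim, target_params):
--     # Same result as A, but evaluates only the O(sqrt(n)) distinct
--     # ceil(n/tie) blocks, jumping to each block's last tie.
--     n = num_modules
--     if n <= 0:
--         return 1, 0
--     p = max(1, projection_dim)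
--     best_tie = best_params = best_score = None
--     t = 1
--     while t <= n:
--         g = -(-n // t)                       # ceil(n / t), constant on the block
--         actual = g * p
--         score = abs(actual - target_params)
--         if best_tie is None or score < best_score or (score == best_score and actual < best_params):
--             best_tie, best_params, best_score = t, actual, score
--         # last tie with the same ceil value, then jump past it
--         t = (n if g == 1 else (n - 1) // (g - 1)) + 1
--     return best_tie, best_params
-- ===== Notes on version B (the rewrite author's own statement) =====
-- stated objective: faster
-- what changed: Instead of scanning every tie in range(1, num_modules+1), B enumerates only the O(sqrt(n)) distinct values of ceil(n/tie) by jumping from each block's first tie directly past its last tie, evaluating one candidate per block (the block's first tie, which is exactly the tie A would keep under its tie-breaking).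
import Mathlib
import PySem

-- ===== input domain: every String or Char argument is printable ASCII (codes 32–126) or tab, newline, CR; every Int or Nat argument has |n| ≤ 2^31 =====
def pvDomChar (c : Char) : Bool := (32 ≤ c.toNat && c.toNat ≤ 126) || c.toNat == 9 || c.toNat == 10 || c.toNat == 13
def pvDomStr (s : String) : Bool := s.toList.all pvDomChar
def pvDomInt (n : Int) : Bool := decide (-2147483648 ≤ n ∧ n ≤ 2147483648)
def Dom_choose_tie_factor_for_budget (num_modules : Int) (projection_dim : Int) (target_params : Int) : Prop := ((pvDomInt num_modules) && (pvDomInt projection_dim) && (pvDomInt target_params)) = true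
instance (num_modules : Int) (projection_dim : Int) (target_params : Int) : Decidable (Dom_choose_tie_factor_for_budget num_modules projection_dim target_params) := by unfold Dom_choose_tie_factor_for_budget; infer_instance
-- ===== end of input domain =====

-- B replaces A's linear scan over all ties by a jump over the O(sqrt(n)) distinct
-- ceil(n/tie) blocks, evaluating one candidate per block (objective: faster).


-- ===== PORT A =====
-- math.ceil(a / b), b > 0: ported as the exact integer ceiling -((-a) // b);
-- this is exact on the stated domain (|a| ≤ 2^31 < 2^53, so the float division
-- cannot round across an integer).
def pvCeil (a b : Int) : Int := -(PySem.Int.floordiv (-a) b)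

def estimate_trainable_params (num_modules : Int) (projection_dim : Int) (tie_factor : Int) : Int :=
  let groups := pvCeil num_modules (max 1 tie_factor)
  groups * max 1 projection_dim

def choose_tie_factor_for_budget (num_modules : Int) (projection_dim : Int) (target_params : Int) : Int × Int :=
  if num_modules ≤ 0 then (1, 0)
  else
    let best_tie : Int := 1
    let best_params := estimate_trainable_params num_modules projection_dim best_tie
    let best_score := |best_params - target_params|
    let r := (PySem.List.pyRange 1 (num_modules + 1) 1).foldl
      (fun (st : Int × Int × Int) tie =>
        let actual := estimate_trainable_params num_modules projection_dim tie
        let score := |actual - target_params|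
        if score < st.2.2 ∨ (score = st.2.2 ∧ actual < st.2.1) then (tie, actual, score) else st)
      (best_tie, best_params, best_score)
    (r.1, r.2.1)

-- ===== PORT B =====
-- the while loop of Source B, state = (t, best); fuel bounds the iteration count
-- (t strictly increases each pass, so num_modules.toNat + 1 steps always suffice)
def pvAltLoop (n : Int) (p : Int) (target_params : Int) : Nat → Int → Option (Int × Int × Int) → Int × Int
  | 0, _, st =>
      (match st with
       | some (bt, bp, _) => (bt, bp)
       | none => (1, 0))
  | fuel + 1, t, st =>
      if t ≤ n then
        let g := -(PySem.Int.floordiv (-n) t)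
        let actual := g * p
        let score := |actual - target_params|
        let st' : Option (Int × Int × Int) :=
          match st with
          | none => some (t, actual, score)
          | some (bt, bp, bs) =>
              if score < bs ∨ (score = bs ∧ actual < bp) then some (t, actual, score)
              else some (bt, bp, bs)
        pvAltLoop n p target_params fuel ((if g = 1 then n else PySem.Int.floordiv (n - 1) (g - 1)) + 1) st'
      else
        (match st with
         | some (bt, bp, _) => (bt, bp)
         | none => (1, 0))

def choose_tie_factor_for_budget_alt (num_modules : Int) (projection_dim : Int) (target_params : Int) : Int × Int :=
  if num_modules ≤ 0 then (1, 0)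
  else pvAltLoop num_modules (max 1 projection_dim) target_params (num_modules.toNat + 1) 1 none

-- ===== PRECONDITION & SPEC =====
def Spec_choose_tie_factor_for_budget (num_modules : Int) (projection_dim : Int) (target_params : Int) (out : Int × Int) : Prop := out = choose_tie_factor_for_budget_alt num_modules projection_dim target_params
instance (num_modules : Int) (projection_dim : Int) (target_params : Int) (out : Int × Int) : Decidable (Spec_choose_tie_factor_for_budget num_modules projection_dim target_params out) := by unfold Spec_choose_tie_factor_for_budget; infer_instance

-- ===== CLAIM (what is proved, stated in full; the proofs are below) =====
def Claim_equal_choose_tie_factor_for_budget : Prop := ∀ (num_modules : Int) (projection_dim : Int) (target_params : Int), Dom_choose_tie_factor_for_budget num_modules projection_dim target_params → Spec_choose_tie_factor_for_budget num_modules projection_dim target_params (choose_tie_factor_for_budget num_modules projection_dim target_params)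

-- ===== LEMMAS AND PROOFS =====

-- A's loop body as a named step function (definitionally A's fold lambda)
def pvUpd (n pd tp : Int) (st : Int × Int × Int) (tie : Int) : Int × Int × Int :=
  let actual := estimate_trainable_params n pd tie
  let score := |actual - tp|
  if score < st.2.2 ∨ (score = st.2.2 ∧ actual < st.2.1) then (tie, actual, score) else st

-- last tie of the block that starts at t
def pvE (n t : Int) : Int := if pvCeil n t = 1 then n else PySem.Int.floordiv (n - 1) (pvCeil n t - 1)

lemma pvCeil_bracket (a b : Int) (hb : 0 < b) : (pvCeil a b - 1) * b < a ∧ a ≤ pvCeil a b * b := by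
  exact (PySem.Int.neg_floordiv_neg_eq_iff_of_pos hb).mp rfl

lemma pvCeil_pos (n t : Int) (hn : 0 < n) (ht : 0 < t) : 1 ≤ pvCeil n t := by
  obtain ⟨h1, h2⟩ := pvCeil_bracket n t ht
  nlinarith

lemma pvE_lb (n t : Int) (hn : 0 < n) (ht : 1 ≤ t) (htn : t ≤ n) : t ≤ pvE n t := by
  have hg1 := pvCeil_pos n t hn (by omega)
  obtain ⟨hb1, hb2⟩ := pvCeil_bracket n t (by omega)
  unfold pvE
  split_ifs with h
  · exact htn
  · have hg2 : 2 ≤ pvCeil n t := by omega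
    rw [PySem.Int.le_floordiv_iff_mul_le (by omega)]
    nlinarith

lemma pvE_ub (n t : Int) (hn : 0 < n) (ht : 1 ≤ t) (_htn : t ≤ n) : pvE n t ≤ n := by
  have hg1 := pvCeil_pos n t hn (by omega)
  unfold pvE
  split_ifs with h
  · exact le_refl n
  · have hg2 : 2 ≤ pvCeil n t := by omega
    have : PySem.Int.floordiv (n - 1) (pvCeil n t - 1) < n + 1 := by
      rw [PySem.Int.floordiv_lt_iff_lt_mul (by omega)]
      nlinarith
    omega

lemma pvCeil_const (n t u : Int) (hn : 0 < n) (ht : 1 ≤ t) (htu : t ≤ u) (hue : u ≤ pvE n t) :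
    pvCeil n u = pvCeil n t := by
  have hg1 := pvCeil_pos n t hn (by omega)
  obtain ⟨hb1, hb2⟩ := pvCeil_bracket n t (by omega)
  have hu : 0 < u := by omega
  rw [show pvCeil n u = -(PySem.Int.floordiv (-n) u) from rfl,
      PySem.Int.neg_floordiv_neg_eq_iff_of_pos hu]
  constructor
  · by_cases h : pvCeil n t = 1
    · simpa [h] using hn
    · have hg2 : 2 ≤ pvCeil n t := by omega
      have := hue
      unfold pvE at this
      rw [if_neg h, PySem.Int.le_floordiv_iff_mul_le (by omega)] at this
      nlinarith
  · nlinarith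

lemma estimate_eq (n pd u : Int) (hu : 1 ≤ u) :
    estimate_trainable_params n pd u = pvCeil n u * max 1 pd := by
  unfold estimate_trainable_params
  rw [max_eq_right hu]

lemma pvFoldl_skip (n pd tp a : Int) (s : Int × Int × Int) (l : List Int)
    (hs : ¬(|a - tp| < s.2.2 ∨ (|a - tp| = s.2.2 ∧ a < s.2.1)))
    (hl : ∀ u ∈ l, estimate_trainable_params n pd u = a) :
    l.foldl (pvUpd n pd tp) s = s := by
  induction l with
  | nil => rfl
  | cons u l ih =>
      have hu := hl u (List.mem_cons_self ..)
      have hstep : pvUpd n pd tp s u = s := by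
        unfold pvUpd
        rw [hu]
        simp only [if_neg hs]
      rw [List.foldl_cons, hstep]
      exact ih (fun v hv => hl v (List.mem_cons_of_mem _ hv))

-- A's fold over [t, n] processes the whole block [t, pvE n t] as the single step pvUpd st t
lemma pvFold_block (n pd tp : Int) (hn : 0 < n) (t : Int) (ht : 1 ≤ t) (htn : t ≤ n)
    (st : Int × Int × Int) :
    (PySem.List.pyRange t (n + 1) 1).foldl (pvUpd n pd tp) st
      = (PySem.List.pyRange (pvE n t + 1) (n + 1) 1).foldl (pvUpd n pd tp) (pvUpd n pd tp st t) := by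
  have he1 := pvE_lb n t hn ht htn
  have he2 := pvE_ub n t hn ht htn
  rw [PySem.List.pyRange_one_append t (pvE n t + 1) (n + 1) (by omega) (by omega),
      List.foldl_append,
      PySem.List.pyRange_one_cons (by omega : t < pvE n t + 1),
      List.foldl_cons]
  congr 1
  apply pvFoldl_skip n pd tp (estimate_trainable_params n pd t)
  · simp only [pvUpd]
    split_ifs with hc
    · simp
    · exact hc
  · intro u hu
    rw [PySem.List.mem_pyRange_one] at hu
    rw [estimate_eq n pd u (by omega), estimate_eq n pd t ht,
        pvCeil_const n t u hn ht (by omega) (by omega)]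

-- B's loop, once the best is initialised, equals A's remaining fold
lemma pvAltLoop_eq (n pd tp : Int) (hn : 0 < n) :
    ∀ (fuel : Nat) (t : Int) (st : Int × Int × Int), 1 ≤ t → (n + 1 - t).toNat ≤ fuel →
    pvAltLoop n (max 1 pd) tp fuel t (some st)
      = (((PySem.List.pyRange t (n + 1) 1).foldl (pvUpd n pd tp) st).1,
         ((PySem.List.pyRange t (n + 1) 1).foldl (pvUpd n pd tp) st).2.1) := by
  intro fuel
  induction fuel with
  | zero =>
      intro t st ht hf
      have hnt : n + 1 ≤ t := by omega
      rw [PySem.List.pyRange_one_eq_nil hnt]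
      rfl
  | succ fuel ih =>
      intro t st ht hf
      obtain ⟨bt, bp, bs⟩ := st
      by_cases htn : t ≤ n
      · have hg1 := pvCeil_pos n t hn (by omega)
        have he1 := pvE_lb n t hn ht htn
        have hact : -PySem.Int.floordiv (-n) t * max 1 pd = estimate_trainable_params n pd t := by
          rw [estimate_eq n pd t ht]; rfl
        have hstep : pvAltLoop n (max 1 pd) tp (fuel + 1) t (some (bt, bp, bs))
            = pvAltLoop n (max 1 pd) tp fuel (pvE n t + 1)
                (some (pvUpd n pd tp (bt, bp, bs) t)) := by
          simp only [pvAltLoop, if_pos htn, pvUpd, hact, apply_ite some]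
          rfl
        rw [hstep, ih (pvE n t + 1) (pvUpd n pd tp (bt, bp, bs) t) (by omega) (by omega),
            pvFold_block n pd tp hn t ht htn (bt, bp, bs)]
      · rw [PySem.List.pyRange_one_eq_nil (by omega : n + 1 ≤ t)]
        simp only [pvAltLoop, if_neg htn]
        rfl

-- ===== VERDICT (by name: the statement is the Claim_ definition above) =====
theorem choose_tie_factor_for_budget_spec : Claim_equal_choose_tie_factor_for_budget := by
  intro n pd tp _
  unfold Spec_choose_tie_factor_for_budget choose_tie_factor_for_budget choose_tie_factor_for_budget_alt
  by_cases hn0 : n ≤ 0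
  · simp [hn0]
  simp only [if_neg hn0]
  have hn : 0 < n := by omega
  have h1n : (1 : Int) ≤ n := by omega
  have he1 := pvE_lb n 1 hn le_rfl h1n
  -- first iteration of B's loop: the `none` state becomes the tie-1 candidate
  have hact : -PySem.Int.floordiv (-n) 1 * max 1 pd = estimate_trainable_params n pd 1 := by
    rw [estimate_eq n pd 1 le_rfl]; rfl
  have hB : pvAltLoop n (max 1 pd) tp (n.toNat + 1) 1 none
      = pvAltLoop n (max 1 pd) tp n.toNat (pvE n 1 + 1)
          (some (1, estimate_trainable_params n pd 1, |estimate_trainable_params n pd 1 - tp|)) := by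
    simp only [pvAltLoop, if_pos h1n, hact]
    rfl
  rw [hB, pvAltLoop_eq n pd tp hn n.toNat (pvE n 1 + 1) _ (by omega) (by omega)]
  -- A's fold: its step function is pvUpd, and the whole first block is a no-op
  show (((PySem.List.pyRange 1 (n + 1) 1).foldl (pvUpd n pd tp)
          (1, estimate_trainable_params n pd 1, |estimate_trainable_params n pd 1 - tp|)).1,
        ((PySem.List.pyRange 1 (n + 1) 1).foldl (pvUpd n pd tp)
          (1, estimate_trainable_params n pd 1, |estimate_trainable_params n pd 1 - tp|)).2.1) = _
  rw [pvFold_block n pd tp hn 1 le_rfl h1n]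
  have hinit : pvUpd n pd tp
      (1, estimate_trainable_params n pd 1, |estimate_trainable_params n pd 1 - tp|) 1
      = (1, estimate_trainable_params n pd 1, |estimate_trainable_params n pd 1 - tp|) := by
    simp [pvUpd]
  rw [hinit]
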